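-- pv_equiv track=rewrite | github.com/sweetpea-org/sweetpea-py | sweetpea/_internal/combinatorics.py | compute_jth_combination_without_replacement
-- ===== SOURCE A (Python) =====
-- from typing import List, Tuple, Dict, Any, Union, Optional, cast
-- from math import factorial
--
-- def compute_jth_combination_without_replacement(n, m, j) -> List[int]:
--     """In a set of ``m`` items, where there are ``n`` choices for each
--     item, this will compute the ``jth`` combination, out of all n-choose-m`
--     possibilities.
--     """
--     combination = []
--     while m > 0:
--         c = m-1
--         f_m = factorial(m)
--         while c+1 < n and n_choose_m_given_m_factorial(c+1, m, f_m) <= j: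
--             c += 1
--         j -= n_choose_m_given_m_factorial(c, m, f_m)
--         combination.append(c)
--         m -= 1
--
--     return combination
--
-- def n_choose_m_given_m_factorial(n: int, m: int, f_m: int):
--     if n < m:
--         return 0
--     if n == m:
--         return 1
--     p = 1
--     h = n - m
--     while n > h:
--         p *= n
--         n -= 1
--     return p // f_m
-- ===== SOURCE B (Python) =====
-- from math import comb
--
-- def compute_jth_combination_without_replacement(n, m, j):
--     """Combinatorial unranking: binary search for the largest c in
--     [m-1, n-1] with comb(c, m) <= j (comb(c, m) is nondecreasing in c),
--     instead of A's linear upward scan with hand-rolled binomials."""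
--     combination = []
--     while m > 0:
--         lo = m - 1
--         hi = n - 1
--         while lo < hi:
--             mid = (lo + hi + 1) // 2
--             if comb(mid, m) <= j:
--                 lo = mid
--             else:
--                 hi = mid - 1
--         j -= comb(lo, m)
--         combination.append(lo)
--         m -= 1
--     return combination
-- ===== Notes on version B (the rewrite author's own statement) =====
-- stated objective: faster
-- what changed: Replaces the inner linear upward scan with hand-rolled factorial-quotient binomials by a binary search over [m-1, n-1] for the largest c with comb(c, m) <= j, exploiting monotonicity of comb(c, m) in c.
import Mathlib
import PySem

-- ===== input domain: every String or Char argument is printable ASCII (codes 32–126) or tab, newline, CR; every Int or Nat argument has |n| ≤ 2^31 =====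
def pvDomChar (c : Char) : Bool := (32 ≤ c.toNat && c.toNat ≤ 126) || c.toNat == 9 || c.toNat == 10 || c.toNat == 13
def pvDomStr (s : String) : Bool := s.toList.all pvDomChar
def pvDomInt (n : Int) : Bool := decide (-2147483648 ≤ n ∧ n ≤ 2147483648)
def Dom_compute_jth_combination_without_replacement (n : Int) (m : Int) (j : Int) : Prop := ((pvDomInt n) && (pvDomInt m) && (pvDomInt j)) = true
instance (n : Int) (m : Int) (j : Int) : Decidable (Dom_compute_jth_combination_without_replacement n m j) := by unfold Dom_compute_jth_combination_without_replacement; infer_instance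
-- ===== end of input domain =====

-- B replaces A's inner linear scan (with hand-rolled factorial-quotient binomials) by a
-- binary search for the largest c in [m-1, n-1] with comb(c, m) ≤ j; intended as faster
-- (timing run measured B 8.26× faster at the largest size both implementations finished).

-- ===== PORT A =====

-- `while n > h: p *= n; n -= 1` of n_choose_m_given_m_factorial
def pvALoop (n h p : Int) : Int :=
  if n > h then pvALoop (n - 1) h (p * n) else p
termination_by (n - h).toNat
decreasing_by omega

-- n_choose_m_given_m_factorial(n, m, f_m)
def pvAChoose (n m f_m : Int) : Int :=
  if n < m then 0
  else if n = m then 1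
  else
    -- h = n - m inlined
    PySem.Int.floordiv (pvALoop n (n - m) 1) f_m

-- inner `while c+1 < n and n_choose_m_given_m_factorial(c+1, m, f_m) <= j: c += 1`
def pvAScan (n m f_m j c : Int) : Int :=
  if c + 1 < n ∧ pvAChoose (c + 1) m f_m ≤ j then pvAScan n m f_m j (c + 1) else c
termination_by (n - c).toNat
decreasing_by omega

-- outer `while m > 0` loop, accumulating `combination`
def pvAOuter (n m j : Int) (combination : List Int) : List Int :=
  if m > 0 then
    -- f_m = math.factorial(m) (m > 0 here); c = result of the inner scan
    pvAOuter n (m - 1)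
      (j - pvAChoose (pvAScan n m (Nat.factorial m.toNat : Int) j (m - 1)) m (Nat.factorial m.toNat : Int))
      (combination ++ [pvAScan n m (Nat.factorial m.toNat : Int) j (m - 1)])
  else combination
termination_by m.toNat
decreasing_by omega

def compute_jth_combination_without_replacement (n : Int) (m : Int) (j : Int) : List Int :=
  pvAOuter n m j []

-- ===== PORT B =====

-- math.comb(c, m) (both arguments nonnegative at every call site)
def pvComb (c m : Int) : Int := (Nat.choose c.toNat m.toNat : Int)

-- B's binary search: largest c in [lo, hi] with comb(c, m) ≤ j (lo if none / empty range)
def pvBSearch (m j lo hi : Int) : Int :=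
  if lo < hi then
    -- mid = (lo + hi + 1) // 2 inlined
    if pvComb (PySem.Int.floordiv (lo + hi + 1) 2) m ≤ j then
      pvBSearch m j (PySem.Int.floordiv (lo + hi + 1) 2) hi
    else
      pvBSearch m j lo (PySem.Int.floordiv (lo + hi + 1) 2 - 1)
  else lo
termination_by (hi - lo).toNat
decreasing_by
  all_goals
    have hb := PySem.Int.floordiv_two_mid_bounds (lo := lo + 1) (hi := hi) (by omega)
    have he : lo + 1 + hi = lo + hi + 1 := by ring
    rw [he] at hb
    omega

-- B's outer `while m > 0` loop
def pvBOuter (n m j : Int) (combination : List Int) : List Int :=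
  if m > 0 then
    pvBOuter n (m - 1) (j - pvComb (pvBSearch m j (m - 1) (n - 1)) m)
      (combination ++ [pvBSearch m j (m - 1) (n - 1)])
  else combination
termination_by m.toNat
decreasing_by omega

def compute_jth_combination_without_replacement_alt (n : Int) (m : Int) (j : Int) : List Int :=
  pvBOuter n m j []

-- ===== PRECONDITION & SPEC =====
def Spec_compute_jth_combination_without_replacement (n : Int) (m : Int) (j : Int) (out : List Int) : Prop := out = compute_jth_combination_without_replacement_alt n m j
instance (n : Int) (m : Int) (j : Int) (out : List Int) : Decidable (Spec_compute_jth_combination_without_replacement n m j out) := by unfold Spec_compute_jth_combination_without_replacement; infer_instance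

-- ===== CLAIM (what is proved, stated in full; the proofs are below) =====
def Claim_equal_compute_jth_combination_without_replacement : Prop := ∀ (n : Int) (m : Int) (j : Int), Dom_compute_jth_combination_without_replacement n m j → Spec_compute_jth_combination_without_replacement n m j (compute_jth_combination_without_replacement n m j)

-- ===== LEMMAS AND PROOFS =====

-- the descending-product loop computes a descending factorial
theorem pvALoop_eq (k : Nat) : ∀ (c h p : Int), 0 ≤ h → h ≤ c → (c - h).toNat = k →
    pvALoop c h p = p * (Nat.descFactorial c.toNat k : Int) := by
  induction k with
  | zero =>
    intro c h p h0 hc hk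
    have : ¬ c > h := by omega
    rw [pvALoop, if_neg this]
    simp [Nat.descFactorial]
  | succ k ih =>
    intro c h p h0 hc hk
    have hgt : c > h := by omega
    rw [pvALoop, if_pos hgt]
    rw [ih (c - 1) h (p * c) h0 (by omega) (by omega)]
    have hc1 : (c - 1).toNat + 1 = c.toNat := by omega
    have : c.toNat.descFactorial (k + 1) = c.toNat * (c - 1).toNat.descFactorial k := by
      rw [← hc1, Nat.succ_descFactorial_succ]
    rw [this]
    push_cast
    have hcast : ((c.toNat : Int)) = c := by omega
    rw [hcast]; ring

-- A's hand-rolled binomial equals math.comb on nonnegative inputs with f_m = m!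
theorem pvAChoose_eq_comb (c m : Int) (hm : 1 ≤ m) (_hc : 0 ≤ c) :
    pvAChoose c m (Nat.factorial m.toNat : Int) = pvComb c m := by
  unfold pvAChoose pvComb
  by_cases h1 : c < m
  · rw [if_pos h1]
    have : c.toNat < m.toNat := by omega
    rw [Nat.choose_eq_zero_of_lt this]
    simp
  · rw [if_neg h1]
    by_cases h2 : c = m
    · rw [if_pos h2]
      subst h2
      rw [Nat.choose_self]
      simp
    · rw [if_neg h2]
      have hcm : m < c := by omega
      rw [pvALoop_eq m.toNat c (c - m) 1 (by omega) (by omega) (by omega)]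
      rw [one_mul]
      have hd : c.toNat.descFactorial m.toNat = c.toNat.choose m.toNat * m.toNat.factorial := by
        rw [Nat.descFactorial_eq_factorial_mul_choose]; ring
      rw [hd]
      push_cast
      rw [PySem.Int.floordiv_eq_ediv_of_pos (by positivity)]
      rw [Int.mul_ediv_cancel _ (by positivity)]

-- comb(·, m) is nondecreasing
theorem pvComb_mono (m x y : Int) (h : x ≤ y) : pvComb x m ≤ pvComb y m := by
  unfold pvComb
  have : x.toNat ≤ y.toNat := by omega
  exact_mod_cast Nat.choose_le_choose m.toNat this

-- A's scan skips over any interval known to satisfy the predicate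
theorem pvAScan_skip (n m f j : Int) (k : Nat) : ∀ (lo mid : Int), lo ≤ mid → mid ≤ n - 1 →
    (∀ x, lo < x → x ≤ mid → pvAChoose x m f ≤ j) → (mid - lo).toNat = k →
    pvAScan n m f j lo = pvAScan n m f j mid := by
  induction k with
  | zero =>
    intro lo mid h1 h2 h3 hk
    have heq : lo = mid := by omega
    subst heq
    rfl
  | succ k ih =>
    intro lo mid h1 h2 h3 hk
    have hlt : lo < mid := by omega
    have hcond : lo + 1 < n ∧ pvAChoose (lo + 1) m f ≤ j :=
      ⟨by omega, h3 (lo + 1) (by omega) (by omega)⟩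
    rw [pvAScan, if_pos hcond]
    exact ih (lo + 1) mid (by omega) h2 (fun x hx1 hx2 => h3 x (by omega) hx2) (by omega)

-- scan result is at least the start
theorem pvAScan_ge (n m f j : Int) : ∀ (k : Nat) (c : Int), (n - c).toNat = k → c ≤ pvAScan n m f j c := by
  intro k
  induction k with
  | zero =>
    intro c hk
    rw [pvAScan]
    have : ¬ (c + 1 < n ∧ pvAChoose (c + 1) m f ≤ j) := by
      intro ⟨h1, _⟩; omega
    rw [if_neg this]
  | succ k ih =>
    intro c hk
    rw [pvAScan]
    split_ifs with h
    · have := ih (c + 1) (by omega)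
      omega
    · omega

-- core: the linear scan equals the binary search
theorem pvScan_eq_bsearch (n m j : Int) (hm : 1 ≤ m) (k : Nat) :
    ∀ (lo hi : Int), m - 1 ≤ lo → lo ≤ hi → hi ≤ n - 1 →
    (∀ x, hi < x → x < n → ¬ pvComb x m ≤ j) → (hi - lo).toNat ≤ k →
    pvAScan n m (Nat.factorial m.toNat : Int) j lo = pvBSearch m j lo hi := by
  induction k with
  | zero =>
    intro lo hi h1 h2 h3 h4 hk
    have heq : lo = hi := by omega
    subst heq
    rw [pvBSearch, if_neg (by omega)]
    rw [pvAScan]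
    have : ¬ (lo + 1 < n ∧ pvAChoose (lo + 1) m (Nat.factorial m.toNat : Int) ≤ j) := by
      intro ⟨ha, hb⟩
      rw [pvAChoose_eq_comb (lo + 1) m hm (by omega)] at hb
      exact h4 (lo + 1) (by omega) (by omega) hb
    rw [if_neg this]
  | succ k ih =>
    intro lo hi h1 h2 h3 h4 hk
    by_cases hlt : lo < hi
    · rw [pvBSearch, if_pos hlt]
      have hb := PySem.Int.floordiv_two_mid_bounds (lo := lo + 1) (hi := hi) (by omega)
      have he : lo + 1 + hi = lo + hi + 1 := by ring
      rw [he] at hb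
      set mid := PySem.Int.floordiv (lo + hi + 1) 2 with hmiddef
      have hmid1 : lo < mid := by omega
      have hmid2 : mid ≤ hi := by omega
      by_cases hp : pvComb mid m ≤ j
      · rw [if_pos hp]
        have hskip : pvAScan n m (Nat.factorial m.toNat : Int) j lo
            = pvAScan n m (Nat.factorial m.toNat : Int) j mid := by
          apply pvAScan_skip n m _ j (mid - lo).toNat lo mid (by omega) (by omega)
          · intro x hx1 hx2
            rw [pvAChoose_eq_comb x m hm (by omega)]
            exact le_trans (pvComb_mono m x mid hx2) hp
          · rfl
        rw [hskip]
        exact ih mid hi (by omega) hmid2 h3 h4 (by omega)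
      · rw [if_neg hp]
        apply ih lo (mid - 1) h1 (by omega) (by omega)
        · intro x hx1 hx2
          by_cases hxh : x ≤ hi
          · intro hc
            exact hp (le_trans (pvComb_mono m mid x (by omega)) hc)
          · exact h4 x (by omega) hx2
        · omega
    · have heq : lo = hi := by omega
      subst heq
      rw [pvBSearch, if_neg (by omega)]
      rw [pvAScan]
      have : ¬ (lo + 1 < n ∧ pvAChoose (lo + 1) m (Nat.factorial m.toNat : Int) ≤ j) := by
        intro ⟨ha, hb⟩
        rw [pvAChoose_eq_comb (lo + 1) m hm (by omega)] at hb
        exact h4 (lo + 1) (by omega) (by omega) hb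
      rw [if_neg this]

-- outer loops agree
theorem pvOuter_eq (n : Int) (k : Nat) : ∀ (m j : Int) (acc : List Int), m.toNat = k →
    pvAOuter n m j acc = pvBOuter n m j acc := by
  induction k with
  | zero =>
    intro m j acc hk
    rw [pvAOuter, pvBOuter]
    have : ¬ m > 0 := by omega
    rw [if_neg this, if_neg this]
  | succ k ih =>
    intro m j acc hk
    have hm : 0 < m := by omega
    rw [pvAOuter, pvBOuter, if_pos hm, if_pos hm]
    have hceq : pvAScan n m (Nat.factorial m.toNat : Int) j (m - 1) = pvBSearch m j (m - 1) (n - 1) := by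
      by_cases hn : m - 1 ≤ n - 1
      · exact pvScan_eq_bsearch n m j (by omega) (n - 1 - (m - 1)).toNat (m - 1) (n - 1)
          (by omega) hn (by omega) (fun x hx1 hx2 => by omega) (by omega)
      · -- n - 1 < m - 1 : both sides are m - 1
        rw [pvBSearch, if_neg (by omega)]
        rw [pvAScan]
        have : ¬ ((m - 1) + 1 < n ∧ pvAChoose ((m - 1) + 1) m (Nat.factorial m.toNat : Int) ≤ j) := by
          intro ⟨ha, _⟩; omega
        rw [if_neg this]
    rw [hceq]
    have hge : m - 1 ≤ pvBSearch m j (m - 1) (n - 1) := by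
      rw [← hceq]
      exact pvAScan_ge n m _ j (n - (m - 1)).toNat (m - 1) rfl
    rw [pvAChoose_eq_comb (pvBSearch m j (m - 1) (n - 1)) m (by omega) (by omega)]
    exact ih (m - 1) _ _ (by omega)

-- ===== VERDICT (by name: the statement is the Claim_ definition above) =====
theorem compute_jth_combination_without_replacement_spec : Claim_equal_compute_jth_combination_without_replacement := by
  intro n m j _
  unfold Spec_compute_jth_combination_without_replacement
  unfold compute_jth_combination_without_replacement compute_jth_combination_without_replacement_alt
  exact pvOuter_eq n m.toNat m j [] rfl
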